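-- pv_equiv track=rewrite | github.com/Genomorf/tasks | 3нечетных_подряд.py | is_3_numbers_odd
-- ===== SOURCE A (Python) =====
-- def is_3_numbers_odd(numbers: list) -> bool:
--     counter: int = 0
--     for number in numbers:
--         if number % 2 != 0:
--             counter += 1
--         else:
--             counter = 0
--         if counter == 3:
--             return True
--     return False
-- ===== SOURCE B (Python) =====
-- def is_3_numbers_odd(numbers: list) -> bool:
--     return any(a % 2 != 0 and b % 2 != 0 and c % 2 != 0
--                for a, b, c in zip(numbers, numbers[1:], numbers[2:]))
-- ===== Notes on version B (the rewrite author's own statement) =====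
-- stated objective: idiomatic
-- what changed: Replaced the reset-on-even running counter with a single any() over the zipped length-3 sliding windows (numbers, numbers[1:], numbers[2:]), keeping no loop state at all.
import Mathlib
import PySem

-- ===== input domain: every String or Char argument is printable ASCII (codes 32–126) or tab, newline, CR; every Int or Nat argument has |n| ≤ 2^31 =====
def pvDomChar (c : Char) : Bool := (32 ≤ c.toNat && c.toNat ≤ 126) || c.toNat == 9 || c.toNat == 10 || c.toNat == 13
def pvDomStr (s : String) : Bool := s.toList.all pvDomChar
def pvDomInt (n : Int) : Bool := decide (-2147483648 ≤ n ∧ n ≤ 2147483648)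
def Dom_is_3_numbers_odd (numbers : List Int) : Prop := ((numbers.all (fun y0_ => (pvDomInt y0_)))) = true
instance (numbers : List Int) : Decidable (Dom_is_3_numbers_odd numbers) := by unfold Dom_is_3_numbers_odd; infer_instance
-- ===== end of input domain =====

-- B replaces A's reset-on-even counter by an any() over the zipped length-3 sliding windows (idiomatic, no loop state).
-- ===== PORT A =====
def pvOdd (n : Int) : Bool := PySem.Int.mod n 2 != 0

def pvGoA : List Int → Int → Bool
  | [], _ => false
  | n :: rest, counter =>
    let counter' := if pvOdd n then counter + 1 else (0 : Int)
    if counter' == 3 then true else pvGoA rest counter'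

def is_3_numbers_odd (numbers : List Int) : Bool := pvGoA numbers 0

-- ===== PORT B =====
def is_3_numbers_odd_alt (numbers : List Int) : Bool :=
  ((numbers.zip (PySem.List.slice numbers (some 1) none)).zip
      (PySem.List.slice numbers (some 2) none)).any
    (fun p => pvOdd p.1.1 && pvOdd p.1.2 && pvOdd p.2)

-- ===== PRECONDITION & SPEC =====
def Spec_is_3_numbers_odd (numbers : List Int) (out : Bool) : Prop := out = is_3_numbers_odd_alt numbers
instance (numbers : List Int) (out : Bool) : Decidable (Spec_is_3_numbers_odd numbers out) := by unfold Spec_is_3_numbers_odd; infer_instance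

-- ===== CLAIM (what is proved, stated in full; the proofs are below) =====
def Claim_equal_is_3_numbers_odd : Prop := ∀ (numbers : List Int), Dom_is_3_numbers_odd numbers → Spec_is_3_numbers_odd numbers (is_3_numbers_odd numbers)

-- ===== LEMMAS AND PROOFS =====

/-- Reference window function: true iff some three consecutive elements are all odd. -/
def pvW : List Int → Bool
  | a :: b :: c :: rest => (pvOdd a && pvOdd b && pvOdd c) || pvW (b :: c :: rest)
  | _ => false

/-- First k elements exist and are all odd. -/
def pvPref : List Int → Nat → Bool
  | _, 0 => true
  | [], _ + 1 => false
  | a :: t, k + 1 => pvOdd a && pvPref t k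

theorem pvPref3_W : ∀ l : List Int, pvPref l 3 = true → pvW l = true := by
  intro l h
  match l with
  | [] => simp [pvPref] at h
  | [a] => simp [pvPref] at h
  | [a, b] => simp [pvPref] at h
  | a :: b :: c :: r => simp [pvPref] at h; simp [pvW, h.1, h.2.1, h.2.2]

theorem pvW_cons : ∀ (a : Int) (t : List Int), pvW (a :: t) = ((pvOdd a && pvPref t 2) || pvW t) := by
  intro a t
  match t with
  | [] => simp [pvW, pvPref]
  | [b] => simp [pvW, pvPref]
  | b :: c :: r => simp [pvW, pvPref, Bool.and_assoc]

theorem pvPref21 : ∀ t : List Int, pvPref t 2 = true → pvPref t 1 = true := by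
  intro t h
  match t with
  | [] => simp [pvPref] at h
  | a :: r => simp [pvPref] at h ⊢; exact h.1

theorem pvGoA_eq : ∀ (l : List Int) (c : Int), (c = 0 ∨ c = 1 ∨ c = 2) →
    pvGoA l c = (pvPref l (3 - c).toNat || pvW l) := by
  intro l
  induction l with
  | nil =>
    intro c hc
    rcases hc with rfl | rfl | rfl <;> simp [pvGoA, pvPref, pvW]
  | cons a t ih =>
    intro c hc
    by_cases ho : pvOdd a = true
    · rcases hc with rfl | rfl | rfl
      · -- c = 0, counter becomes 1
        have ih1 := ih 1 (by norm_num)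
        norm_num at ih1
        simp only [pvGoA, ho, if_true]
        norm_num [ih1]
        rw [pvW_cons]
        show (pvPref t 2 || pvW t) = (pvPref (a :: t) 3 || (pvOdd a && pvPref t 2 || pvW t))
        simp only [pvPref, ho, Bool.true_and]
        cases pvPref t 2 <;> simp
      · -- c = 1, counter becomes 2
        have ih2 := ih 2 (by norm_num)
        norm_num at ih2
        simp only [pvGoA, ho, if_true]
        norm_num [ih2]
        rw [pvW_cons]
        show (pvPref t 1 || pvW t) = (pvPref (a :: t) 2 || (pvOdd a && pvPref t 2 || pvW t))
        simp only [pvPref, ho, Bool.true_and]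
        by_cases h2 : pvPref t 2 = true
        · simp [h2, pvPref21 t h2]
        · simp [h2]
      · -- c = 2, counter becomes 3: return True
        simp [pvGoA, ho, pvPref]
    · -- even: counter resets to 0
      have ih0 := ih 0 (by norm_num)
      norm_num at ih0
      simp only [pvGoA, ho]
      norm_num [ih0]
      rw [pvW_cons]
      simp only [ho, Bool.false_and, Bool.false_or]
      have hr : pvPref (a :: t) (3 - c).toNat = false := by
        rcases hc with rfl | rfl | rfl <;> simp [pvPref, ho]
      rw [hr]
      by_cases h3 : pvPref t 3 = true
      · simp [h3, pvPref3_W t h3]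
      · simp [h3]

theorem pvZip_eq_W : ∀ l : List Int,
    ((l.zip l.tail).zip (l.drop 2)).any (fun p => pvOdd p.1.1 && pvOdd p.1.2 && pvOdd p.2) = pvW l
  | [] => by simp [pvW]
  | [a] => by simp [pvW]
  | [a, b] => by simp [pvW]
  | a :: b :: c :: r => by
    have ih := pvZip_eq_W (b :: c :: r)
    simp only [List.tail_cons, List.drop_succ_cons, List.drop_zero] at ih ⊢
    simp only [List.zip_cons_cons, List.any_cons, pvW]
    rw [← ih]
    simp [Bool.and_assoc]

theorem pvAlt_eq_W : ∀ l : List Int, is_3_numbers_odd_alt l = pvW l := by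
  intro l
  unfold is_3_numbers_odd_alt
  rw [PySem.List.slice_from_one]
  rw [show PySem.List.slice l (some 2) none = l.drop 2 by
    rw [show ((2:Int)) = ((2:Nat):Int) by norm_num, PySem.List.slice_from_natCast]]
  exact pvZip_eq_W l

-- ===== VERDICT (by name: the statement is the Claim_ definition above) =====
theorem is_3_numbers_odd_spec : Claim_equal_is_3_numbers_odd := by
  intro numbers _
  unfold Spec_is_3_numbers_odd is_3_numbers_odd
  rw [pvAlt_eq_W, pvGoA_eq numbers 0 (Or.inl rfl)]
  norm_num
  by_cases h3 : pvPref numbers 3 = true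
  · simp [h3, pvPref3_W numbers h3]
  · simp [h3]
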